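-- pv_equiv track=rewrite | github.com/BUAAZhangHaonan/mujoco-cpu-sim | src/core/simulation.py | distribute_scenes
-- ===== SOURCE A (Python) =====
-- from typing import List, Dict
--
-- def distribute_scenes(total_scenes: int, num_workers: int) -> List[List[int]]:
--     """将场景分配给不同的工作进程"""
--     scenes_per_worker = total_scenes // num_workers
--     remainder = total_scenes % num_workers
--
--     scene_assignments = []
--     start_idx = 0
--
--     for i in range(num_workers):
--         current_batch_size = scenes_per_worker + (1 if i < remainder else 0)
--         end_idx = start_idx + current_batch_size
--         scene_assignments.append(list(range(start_idx, end_idx)))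
--         start_idx = end_idx
--
--     return scene_assignments
-- ===== SOURCE B (Python) =====
-- def distribute_scenes(total_scenes: int, num_workers: int):
--     """将场景分配给不同的工作进程"""
--     base = total_scenes // num_workers
--     remainder = total_scenes % num_workers
--     return [
--         list(range(i * base + min(i, remainder),
--                    (i + 1) * base + min(i + 1, remainder)))
--         for i in range(num_workers)
--     ]
-- ===== Notes on version B (the rewrite author's own statement) =====
-- stated objective: alternative
-- what changed: Each worker's range boundaries are computed in closed form (i*base + min(i, remainder)) instead of threading a mutable start_idx accumulator through the loop.
import Mathlib
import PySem

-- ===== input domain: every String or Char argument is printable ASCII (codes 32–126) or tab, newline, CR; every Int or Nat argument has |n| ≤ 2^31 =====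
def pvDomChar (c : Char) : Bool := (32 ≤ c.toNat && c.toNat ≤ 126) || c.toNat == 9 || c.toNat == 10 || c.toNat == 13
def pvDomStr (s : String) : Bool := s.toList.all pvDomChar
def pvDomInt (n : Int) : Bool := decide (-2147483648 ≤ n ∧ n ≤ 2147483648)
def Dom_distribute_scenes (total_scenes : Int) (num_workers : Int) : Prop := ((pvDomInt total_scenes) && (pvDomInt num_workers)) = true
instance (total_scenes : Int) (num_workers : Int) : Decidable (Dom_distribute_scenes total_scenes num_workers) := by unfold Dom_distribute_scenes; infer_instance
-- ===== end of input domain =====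

-- B computes each worker's range boundaries in closed form instead of threading a
-- running start_idx accumulator; return values agree whenever num_workers ≠ 0.

-- ===== PORT A =====
def distribute_scenes (total_scenes : Int) (num_workers : Int) : List (List Int) :=
  let scenes_per_worker := PySem.Int.floordiv total_scenes num_workers
  let remainder := PySem.Int.mod total_scenes num_workers
  ((PySem.List.pyRange 0 num_workers 1).foldl
    (fun (st : List (List Int) × Int) i =>
      let current_batch_size := scenes_per_worker + (if i < remainder then (1 : Int) else 0)
      let end_idx := st.2 + current_batch_size
      (st.1 ++ [PySem.List.pyRange st.2 end_idx 1], end_idx))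
    ([], 0)).1

-- ===== PORT B =====
def distribute_scenes_alt (total_scenes : Int) (num_workers : Int) : List (List Int) :=
  let base := PySem.Int.floordiv total_scenes num_workers
  let remainder := PySem.Int.mod total_scenes num_workers
  (PySem.List.pyRange 0 num_workers 1).map (fun i =>
    PySem.List.pyRange (i * base + min i remainder)
      ((i + 1) * base + min (i + 1) remainder) 1)

-- ===== PRECONDITION & SPEC =====
-- Pre_ excludes exactly num_workers = 0, where Python A raises ZeroDivisionError.
def Pre_distribute_scenes (total_scenes : Int) (num_workers : Int) : Prop := num_workers ≠ 0
instance (total_scenes : Int) (num_workers : Int) : Decidable (Pre_distribute_scenes total_scenes num_workers) := by unfold Pre_distribute_scenes; infer_instance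
def pvWitness_distribute_scenes : Int × Int := (10, 3)
def Spec_distribute_scenes (total_scenes : Int) (num_workers : Int) (out : List (List Int)) : Prop := out = distribute_scenes_alt total_scenes num_workers
instance (total_scenes : Int) (num_workers : Int) (out : List (List Int)) : Decidable (Spec_distribute_scenes total_scenes num_workers out) := by unfold Spec_distribute_scenes; infer_instance

-- ===== CLAIM (what is proved, stated in full; the proofs are below) =====
def Claim_equal_distribute_scenes : Prop := ∀ (total_scenes : Int) (num_workers : Int), Dom_distribute_scenes total_scenes num_workers → Pre_distribute_scenes total_scenes num_workers → Spec_distribute_scenes total_scenes num_workers (distribute_scenes total_scenes num_workers)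

-- ===== LEMMAS AND PROOFS =====

-- Loop invariant: starting A's fold at position j with start index j*base + min j rem
-- produces exactly B's closed-form batches for the remaining workers.
lemma distribute_fold_inv (base rem n : Int) :
    ∀ (k : Nat) (j : Int) (acc : List (List Int)), (n - j).toNat = k →
    ((PySem.List.pyRange j n 1).foldl
      (fun (st : List (List Int) × Int) i =>
        let cbs := base + (if i < rem then (1 : Int) else 0)
        let e := st.2 + cbs
        (st.1 ++ [PySem.List.pyRange st.2 e 1], e))
      (acc, j * base + min j rem)).1
    = acc ++ (PySem.List.pyRange j n 1).map (fun i =>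
        PySem.List.pyRange (i * base + min i rem) ((i + 1) * base + min (i + 1) rem) 1) := by
  intro k
  induction k with
  | zero =>
    intro j acc h
    rw [PySem.List.pyRange_one_eq_nil (by omega)]
    simp
  | succ k ih =>
    intro j acc h
    have hjn : j < n := by omega
    rw [PySem.List.pyRange_one_cons hjn]
    simp only [List.foldl_cons, List.map_cons]
    have hstep : j * base + min j rem + (base + (if j < rem then (1 : Int) else 0))
        = (j + 1) * base + min (j + 1) rem := by
      have hmul : (j + 1) * base = j * base + base := by ring
      rw [hmul]; split_ifs with hh <;> omega
    rw [hstep]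
    rw [ih (j + 1) (acc ++ [PySem.List.pyRange (j * base + min j rem) ((j + 1) * base + min (j + 1) rem) 1]) (by omega)]
    simp



-- ===== VERDICT (by name: the statement is the Claim_ definition above) =====
theorem distribute_scenes_spec : Claim_equal_distribute_scenes := by
  intro t n _ hn
  unfold Spec_distribute_scenes distribute_scenes distribute_scenes_alt
  by_cases hpos : 0 < n
  · have hrem : 0 ≤ PySem.Int.mod t n := PySem.Int.mod_nonneg t hpos
    have key := distribute_fold_inv (PySem.Int.floordiv t n) (PySem.Int.mod t n) n
      (n - 0).toNat 0 [] rfl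
    rw [min_eq_left hrem] at key
    simp only [zero_mul, add_zero, List.nil_append] at key
    simpa using key
  · rw [PySem.List.pyRange_one_eq_nil (by omega)]
    simp
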